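-- pv_equiv track=rewrite | github.com/rakxsit/dunan | scripts/burst_detect.py | polarity
-- ===== SOURCE A (Python) =====
-- def polarity(data):
--     neg_peak = 0
--     pos_peak = 0
--
--     for i in range(len(data)):
--         if data[i] < neg_peak:
--             neg_peak = data[i]
--         if data[i] > pos_peak:
--             pos_peak = data[i]
--     if -neg_peak > pos_peak:
--         return -1
--     else:
--         return 1
-- ===== SOURCE B (Python) =====
-- def polarity(data):
--     s = sorted(data)
--     return -1 if s and s[0] + s[-1] < 0 else 1
-- ===== Notes on version B (the rewrite author's own statement) =====
-- stated objective: alternative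
-- what changed: Sorts the data once and decides polarity by whether the sorted endpoints sum below zero (s[0]+s[-1]<0), replacing A's fused running clamped-peak loop and magnitude comparison.
import Mathlib
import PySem

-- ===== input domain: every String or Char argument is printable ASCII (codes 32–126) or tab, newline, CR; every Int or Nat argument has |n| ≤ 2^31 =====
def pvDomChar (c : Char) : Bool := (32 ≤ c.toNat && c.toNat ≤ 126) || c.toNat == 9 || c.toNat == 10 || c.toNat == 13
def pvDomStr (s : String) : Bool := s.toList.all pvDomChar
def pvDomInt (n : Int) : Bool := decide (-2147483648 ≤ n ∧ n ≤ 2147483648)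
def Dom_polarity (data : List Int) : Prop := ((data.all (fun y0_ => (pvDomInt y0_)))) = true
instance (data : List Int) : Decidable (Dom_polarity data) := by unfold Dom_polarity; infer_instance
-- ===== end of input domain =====

-- B sorts the data once and tests whether the sorted endpoints sum below zero,
-- instead of A's fused running clamped-peak loop (alternative algorithm; return values proved equal).

-- ===== PORT A =====
-- A: one indexed loop maintaining running neg_peak/pos_peak, both starting at 0, then compares magnitudes.
def polarity (data : List Int) : Int :=
  let st := data.foldl
    (fun (s : Int × Int) x =>
      (if x < s.1 then x else s.1, if x > s.2 then x else s.2))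
    (0, 0)
  if -st.1 > st.2 then -1 else 1

-- ===== PORT B =====
-- B: s = sorted(data); -1 iff s nonempty and s[0] + s[-1] < 0.
def polarity_alt (data : List Int) : Int :=
  match PySem.List.sorted data (fun x => x) false with
  | [] => 1
  | x :: xs => if x + (x :: xs).getLast (List.cons_ne_nil x xs) < 0 then -1 else 1

-- ===== PRECONDITION & SPEC =====
def Spec_polarity (data : List Int) (out : Int) : Prop := out = polarity_alt data
instance (data : List Int) (out : Int) : Decidable (Spec_polarity data out) := by unfold Spec_polarity; infer_instance

-- ===== CLAIM (what is proved, stated in full; the proofs are below) =====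
def Claim_equal_polarity : Prop := ∀ (data : List Int), Dom_polarity data → Spec_polarity data (polarity data)

-- ===== LEMMAS AND PROOFS =====


theorem pv_foldl_pair (l : List Int) (a b : Int) :
    l.foldl (fun (s : Int × Int) x =>
      (if x < s.1 then x else s.1, if x > s.2 then x else s.2)) (a, b)
    = (l.foldl min a, l.foldl max b) := by
  induction l generalizing a b with
  | nil => rfl
  | cons c l ih =>
    rw [List.foldl_cons, ih]
    have h1 : (if c < a then c else a) = min a c := by omega
    have h2 : (if b < c then c else b) = max b c := by omega
    simp only [List.foldl_cons, gt_iff_lt, h1, h2]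

theorem pv_foldl_min_le_init (l : List Int) (a : Int) : l.foldl min a ≤ a := by
  induction l generalizing a with
  | nil => simp
  | cons c l ih => exact le_trans (ih (min a c)) (min_le_left a c)

theorem pv_foldl_min_le_mem (l : List Int) (a m : Int) (h : m ∈ l) : l.foldl min a ≤ m := by
  induction l generalizing a with
  | nil => cases h
  | cons c l ih =>
    rcases List.mem_cons.mp h with h | h
    · subst h; exact le_trans (pv_foldl_min_le_init l (min a m)) (min_le_right a m)
    · exact ih (min a c) h

theorem pv_le_foldl_min (l : List Int) (a c : Int) (ha : c ≤ a) (h : ∀ y ∈ l, c ≤ y) :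
    c ≤ l.foldl min a := by
  induction l generalizing a with
  | nil => exact ha
  | cons d l ih =>
    exact ih (min a d) (le_min ha (h d (List.mem_cons_self))) (fun y hy => h y (List.mem_cons_of_mem d hy))

theorem pv_init_le_foldl_max (l : List Int) (a : Int) : a ≤ l.foldl max a := by
  induction l generalizing a with
  | nil => simp
  | cons c l ih => exact le_trans (le_max_left a c) (ih (max a c))

theorem pv_mem_le_foldl_max (l : List Int) (a m : Int) (h : m ∈ l) : m ≤ l.foldl max a := by
  induction l generalizing a with
  | nil => cases h
  | cons c l ih =>
    rcases List.mem_cons.mp h with h | h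
    · subst h; exact le_trans (le_max_right a m) (pv_init_le_foldl_max l (max a m))
    · exact ih (max a c) h

theorem pv_foldl_max_le (l : List Int) (a c : Int) (ha : a ≤ c) (h : ∀ y ∈ l, y ≤ c) :
    l.foldl max a ≤ c := by
  induction l generalizing a with
  | nil => exact ha
  | cons d l ih =>
    exact ih (max a d) (max_le ha (h d (List.mem_cons_self))) (fun y hy => h y (List.mem_cons_of_mem d hy))

theorem pv_le_getLast (l : List Int) (h : l ≠ []) (hp : l.Pairwise (· ≤ ·)) :
    ∀ y ∈ l, y ≤ l.getLast h := by
  induction l with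
  | nil => cases h rfl
  | cons c t ih =>
    intro y hy
    rcases List.mem_cons.mp hy with hy | hy
    · subst hy
      cases t with
      | nil => simp [List.getLast]
      | cons d t' =>
        rw [List.getLast_cons (List.cons_ne_nil d t')]
        exact le_trans ((List.pairwise_cons.mp hp).1 _ (List.getLast_mem _))
          (le_refl _)
    · cases t with
      | nil => cases hy
      | cons d t' =>
        rw [List.getLast_cons (List.cons_ne_nil d t')]
        exact ih (List.cons_ne_nil d t') (List.pairwise_cons.mp hp).2 y hy

-- ===== VERDICT (by name: the statement is the Claim_ definition above) =====
theorem polarity_spec : Claim_equal_polarity := by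
  intro data _
  unfold Spec_polarity polarity polarity_alt
  rw [pv_foldl_pair]
  rcases hs : PySem.List.sorted data (fun x => x) false with _ | ⟨x, xs⟩
  · have hd : data = [] := by
      have := PySem.List.sorted_perm data (fun x => x) false
      rw [hs] at this
      exact (List.Perm.nil_eq this).symm
    subst hd; simp
  · -- data is nonempty; x is its minimum, getLast its maximum
    have hperm := PySem.List.sorted_perm data (fun x => x) false
    rw [hs] at hperm
    have hmemx : x ∈ data := hperm.mem_iff.mp (List.mem_cons_self)
    have hlow : ∀ y ∈ data, x ≤ y := by
      intro y hy
      exact PySem.List.key_head_sorted_le data (fun x => x) hs y hy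
    set L := (x :: xs).getLast (List.cons_ne_nil x xs) with hL
    have hmemL : L ∈ data := hperm.mem_iff.mp (List.getLast_mem _)
    have hpw : (x :: xs).Pairwise (fun a b => (a : Int) ≤ b) := by
      have := PySem.List.sorted_pairwise data (fun x : Int => x)
      rwa [hs] at this
    have hhigh : ∀ y ∈ data, y ≤ L := by
      intro y hy
      exact pv_le_getLast (x :: xs) (List.cons_ne_nil x xs) hpw y (hperm.mem_iff.mpr hy)
    have hmin : data.foldl min 0 = min 0 x := by
      apply le_antisymm
      · exact le_min (pv_foldl_min_le_init data 0) (pv_foldl_min_le_mem data 0 x hmemx)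
      · exact pv_le_foldl_min data 0 (min 0 x) (min_le_left 0 x)
          (fun y hy => le_trans (min_le_right 0 x) (hlow y hy))
    have hmax : data.foldl max 0 = max 0 L := by
      apply le_antisymm
      · exact pv_foldl_max_le data 0 (max 0 L) (le_max_left 0 L)
          (fun y hy => le_trans (hhigh y hy) (le_max_right 0 L))
      · exact max_le (pv_init_le_foldl_max data 0) (pv_mem_le_foldl_max data 0 L hmemL)
    have hxL : x ≤ L := hhigh x hmemx
    rw [hmin, hmax]
    split
    next heq => exact absurd heq (List.cons_ne_nil x xs)
    next a as heq =>
      obtain ⟨rfl, rfl⟩ : x = a ∧ xs = as := by injection heq with h1 h2; exact ⟨h1, h2⟩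
      rw [← hL]
      dsimp only
      split <;> split <;> omega
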